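-- pv_equiv track=rewrite | github.com/SzymonIwaniuk/wdi-2024-2025 | Zestaw2/ZadB12021.py | system4
-- ===== SOURCE A (Python) =====
-- def system4(n):
--     liczba = 0
--     place_value = 1
--
--     while n > 0:
--         liczba += (n % 4) * place_value
--         n //= 4
--         place_value *= 10
--
--     return liczba
-- ===== SOURCE B (Python) =====
-- def system4(n):
--     if n <= 0:
--         return 0
--     return system4(n // 4) * 10 + n % 4
-- ===== Notes on version B (the rewrite author's own statement) =====
-- stated objective: simpler
-- what changed: Replaces A's while loop with three accumulator variables (result, place value, shrinking n) by a direct recursion system4(n//4)*10 + n%4 with base case n<=0.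
import Mathlib
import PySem

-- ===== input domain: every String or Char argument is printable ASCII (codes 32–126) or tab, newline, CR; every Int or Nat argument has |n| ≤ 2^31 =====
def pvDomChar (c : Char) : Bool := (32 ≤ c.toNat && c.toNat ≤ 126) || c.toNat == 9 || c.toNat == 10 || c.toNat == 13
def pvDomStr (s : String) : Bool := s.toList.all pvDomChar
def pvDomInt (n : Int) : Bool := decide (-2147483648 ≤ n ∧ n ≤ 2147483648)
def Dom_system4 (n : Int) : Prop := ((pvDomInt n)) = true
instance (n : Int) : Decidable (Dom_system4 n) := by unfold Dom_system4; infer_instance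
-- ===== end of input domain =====

-- B replaces A's accumulator while-loop by a direct recursion n -> n//4 (objective: simpler).

-- ===== PORT A =====
-- while n > 0: liczba += (n % 4) * place_value; n //= 4; place_value *= 10
def system4Loop (n liczba place_value : Int) : Int :=
  if 0 < n then
    system4Loop (PySem.Int.floordiv n 4) (liczba + (PySem.Int.mod n 4) * place_value) (place_value * 10)
  else liczba
termination_by n.toNat
decreasing_by
  rw [PySem.Int.floordiv_eq_ediv_of_pos (by omega)]
  omega

def system4 (n : Int) : Int := system4Loop n 0 1

-- ===== PORT B =====
def system4_alt (n : Int) : Int :=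
  if n ≤ 0 then 0
  else system4_alt (PySem.Int.floordiv n 4) * 10 + PySem.Int.mod n 4
termination_by n.toNat
decreasing_by
  rw [PySem.Int.floordiv_eq_ediv_of_pos (by omega)]
  omega

-- ===== PRECONDITION & SPEC =====
def Spec_system4 (n : Int) (out : Int) : Prop := out = system4_alt n
instance (n : Int) (out : Int) : Decidable (Spec_system4 n out) := by unfold Spec_system4; infer_instance

-- ===== CLAIM (what is proved, stated in full; the proofs are below) =====
def Claim_equal_system4 : Prop := ∀ (n : Int), Dom_system4 n → Spec_system4 n (system4 n)

-- ===== LEMMAS AND PROOFS =====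
theorem system4Loop_eq (k : Nat) : ∀ (n L pv : Int), n.toNat ≤ k →
    system4Loop n L pv = L + pv * system4_alt n := by
  induction k with
  | zero =>
    intro n L pv h
    rw [system4Loop, system4_alt]
    simp only [if_neg (by omega : ¬ 0 < n), if_pos (by omega : n ≤ 0)]
    ring
  | succ k ih =>
    intro n L pv h
    by_cases hn : 0 < n
    · rw [system4Loop, system4_alt, if_pos hn, if_neg (by omega : ¬ n ≤ 0)]
      rw [ih _ _ _ (by rw [PySem.Int.floordiv_eq_ediv_of_pos (by omega)]; omega)]
      rw [PySem.Int.mod_eq_emod_of_pos (by omega)]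
      ring
    · rw [system4Loop, system4_alt]
      simp only [if_neg hn, if_pos (by omega : n ≤ 0)]
      ring

-- ===== VERDICT (by name: the statement is the Claim_ definition above) =====
theorem system4_spec : Claim_equal_system4 := by
  intro n _
  unfold Spec_system4 system4
  rw [system4Loop_eq n.toNat n 0 1 le_rfl]
  ring
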